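-- pv_equiv track=rewrite | github.com/ray-project/ray | python/ray/data/sql/utils.py | create_column_mapping
-- ===== SOURCE A (Python) =====
-- from typing import Any, Dict, List, Optional
--
-- def normalize_identifier(name: str, case_sensitive: bool = False) -> str:
--     """Normalize SQL identifiers for case-insensitive matching.
--
--     Args:
--         name: Identifier to normalize.
--         case_sensitive: Whether to preserve case.
--
--     Returns:
--         Normalized identifier.
--     """
--     if name is None:
--         return None
--     name = str(name).strip()
--     return name if case_sensitive else name.lower()
--
-- def create_column_mapping(
--     columns: List[str], case_sensitive: bool = False
-- ) -> Dict[str, str]: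
--     """Create a mapping from normalized column names to their actual names.
--
--     Args:
--         columns: List of column names.
--         case_sensitive: Whether to preserve case in normalization.
--
--     Returns:
--         Dictionary mapping normalized names to actual names.
--     """
--     mapping = {}
--     if columns:
--         for col in columns:
--             normalized = normalize_identifier(col, case_sensitive)
--             if normalized not in mapping:
--                 mapping[normalized] = col
--     return mapping
-- ===== SOURCE B (Python) =====
-- def normalize_identifier(name, case_sensitive=False):
--     if name is None:
--         return None
--     name = str(name).strip()
--     return name if case_sensitive else name.lower()
--
--
-- def create_column_mapping(columns, case_sensitive=False):
--     # Worklist algorithm: take the first remaining column, record its pair,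
--     # and drop every later column with the same normalized key; no membership
--     # check against the mapping being built is ever needed.
--     mapping = {}
--     remaining = list(columns) if columns else []
--     while remaining:
--         head = remaining[0]
--         key = normalize_identifier(head, case_sensitive)
--         mapping[key] = head
--         remaining = [c for c in remaining[1:]
--                      if normalize_identifier(c, case_sensitive) != key]
--     return mapping
-- ===== Notes on version B (the rewrite author's own statement) =====
-- stated objective: alternative
-- what changed: Replaces A's single pass that mutates a dict behind a not-in-mapping membership guard by a worklist loop: emit the first remaining column's (normalized, original) pair and shrink the worklist by filtering out every later column with the same normalized key, so no membership test against the mapping is ever made.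
import Mathlib
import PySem

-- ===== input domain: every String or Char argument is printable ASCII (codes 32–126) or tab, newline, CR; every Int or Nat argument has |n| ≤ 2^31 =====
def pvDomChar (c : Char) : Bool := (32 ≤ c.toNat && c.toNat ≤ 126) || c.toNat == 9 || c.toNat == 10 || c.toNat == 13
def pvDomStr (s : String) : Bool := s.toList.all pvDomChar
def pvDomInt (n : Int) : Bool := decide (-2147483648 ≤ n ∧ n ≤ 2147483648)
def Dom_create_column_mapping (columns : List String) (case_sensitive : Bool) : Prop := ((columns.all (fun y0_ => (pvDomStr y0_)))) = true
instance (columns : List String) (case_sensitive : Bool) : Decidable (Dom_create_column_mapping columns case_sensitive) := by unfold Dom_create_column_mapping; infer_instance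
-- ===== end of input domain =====

-- B replaces A's dict-with-membership-guard pass by a recursion that filters out same-key columns; objective: alternative decomposition (not faster).

-- ===== PORT A =====
-- normalize_identifier (names are always strings here, so the `name is None` branch never fires)
def pvNormalize (name : String) (case_sensitive : Bool) : String :=
  let name := PySem.Str.strip name
  if case_sensitive then name else PySem.Str.lower name

def create_column_mapping (columns : List String) (case_sensitive : Bool) : List (String × String) :=
  let mapping : PySem.Dict String String := PySem.Dict.empty
  let mapping :=
    if !columns.isEmpty then
      columns.foldl (fun mapping col =>
        let normalized := pvNormalize col case_sensitive
        if !(mapping.contains normalized) then mapping.insert normalized col else mapping) mapping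
    else mapping
  mapping.items

-- ===== PORT B =====
-- recursion of Source B: head's pair, then recurse on the tail without same-key columns;
-- `{key: head, **rest_map}` is the cons: rest_map never contains `key` (it was filtered out of rem).
def create_column_mapping_alt (columns : List String) (case_sensitive : Bool) : List (String × String) :=
  match columns with
  | [] => []
  | head :: rest =>
    let key := pvNormalize head case_sensitive
    (key, head) :: create_column_mapping_alt (rest.filter (fun c => pvNormalize c case_sensitive != key)) case_sensitive
termination_by columns.length
decreasing_by simpa using Nat.lt_succ_of_le (List.length_filter_le _ _)

-- ===== PRECONDITION & SPEC =====
def Spec_create_column_mapping (columns : List String) (case_sensitive : Bool) (out : List (String × String)) : Prop := out = create_column_mapping_alt columns case_sensitive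
instance (columns : List String) (case_sensitive : Bool) (out : List (String × String)) : Decidable (Spec_create_column_mapping columns case_sensitive out) := by unfold Spec_create_column_mapping; infer_instance

-- ===== CLAIM (what is proved, stated in full; the proofs are below) =====
def Claim_equal_create_column_mapping : Prop := ∀ (columns : List String) (case_sensitive : Bool), Dom_create_column_mapping columns case_sensitive → Spec_create_column_mapping columns case_sensitive (create_column_mapping columns case_sensitive)

-- ===== LEMMAS AND PROOFS =====

-- A's loop, characterized: starting from any mapping with distinct keys, it appends exactly
-- B's recursion over the columns whose normalized key is not yet present.
theorem pvLoop_eq (cs : Bool) (cols : List String) :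
    ∀ (m : PySem.Dict String String), m.keys.Nodup →
      (cols.foldl (fun mapping col =>
        let normalized := pvNormalize col cs
        if !(mapping.contains normalized) then mapping.insert normalized col else mapping) m).items
      = m.items ++ create_column_mapping_alt
          (cols.filter (fun c => !(m.contains (pvNormalize c cs)))) cs := by
  induction cols with
  | nil => intro m _; simp [create_column_mapping_alt]
  | cons c rest ih =>
    intro m hnd
    by_cases hc : m.contains (pvNormalize c cs)
    · -- key already present: c is dropped, mapping unchanged
      simp only [List.foldl_cons, List.filter_cons, hc]
      simpa [hc] using ih m hnd
    · -- fresh key: insert appends, and the recursion emits c's pair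
      have hc' : m.contains (pvNormalize c cs) = false := by
        cases h : m.contains (pvNormalize c cs) <;> simp_all
      simp only [List.foldl_cons, List.filter_cons, hc', Bool.not_false, if_true]
      rw [ih (m.insert (pvNormalize c cs) c) (PySem.Dict.nodup_keys_insert m _ _ hnd)]
      rw [PySem.Dict.items_insert_of_not_contains m _ _]
      rw [create_column_mapping_alt]
      simp only [List.append_assoc, List.cons_append, List.nil_append]
      congr 2
      rw [List.filter_filter]
      congr 1
      apply List.filter_congr
      intro x _
      simp [PySem.Dict.contains_insert]
      tauto
      -- side goal of items_insert_of_not_contains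
      exact hc'

-- ===== VERDICT (by name: the statement is the Claim_ definition above) =====
theorem create_column_mapping_spec : Claim_equal_create_column_mapping := by
  intro columns cs _
  unfold Spec_create_column_mapping create_column_mapping
  cases columns with
  | nil => simp [create_column_mapping_alt, PySem.Dict.empty]
  | cons c rest =>
    simp only [List.isEmpty_cons, Bool.not_false, if_true]
    rw [pvLoop_eq cs (c :: rest) PySem.Dict.empty (by simp [PySem.Dict.keys_empty])]
    simp [PySem.Dict.empty]
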